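-- pv_equiv track=rewrite | github.com/ImDaBigBoss/AdventOfCode-2024 | day9/puzzle1.py | is_minimised
-- ===== SOURCE A (Python) =====
-- def is_minimised(filesystem: list) -> bool:
--     """Returns if there are any empty blocks in the middle of the data."""
--
--     found_empty = False
--     for id in filesystem:
--         if found_empty and id != -1:
--             return False
--         if id == -1:
--             found_empty = True
--
--     return True
-- ===== SOURCE B (Python) =====
-- def is_minimised(filesystem: list) -> bool:
--     """Returns if there are any empty blocks in the middle of the data."""
--     # Scan from the right to measure the trailing run of -1, then check the
--     # remaining prefix contains no -1 at all.
--     tail = 0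
--     for block in reversed(filesystem):
--         if block != -1:
--             break
--         tail += 1
--     return -1 not in filesystem[:len(filesystem) - tail]
-- ===== Notes on version B (the rewrite author's own statement) =====
-- stated objective: alternative
-- what changed: Replaces the single left-to-right flagged scan by a two-phase check: a right-to-left scan strips the trailing run of -1, then a membership test verifies the remaining prefix holds no -1.
import Mathlib
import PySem

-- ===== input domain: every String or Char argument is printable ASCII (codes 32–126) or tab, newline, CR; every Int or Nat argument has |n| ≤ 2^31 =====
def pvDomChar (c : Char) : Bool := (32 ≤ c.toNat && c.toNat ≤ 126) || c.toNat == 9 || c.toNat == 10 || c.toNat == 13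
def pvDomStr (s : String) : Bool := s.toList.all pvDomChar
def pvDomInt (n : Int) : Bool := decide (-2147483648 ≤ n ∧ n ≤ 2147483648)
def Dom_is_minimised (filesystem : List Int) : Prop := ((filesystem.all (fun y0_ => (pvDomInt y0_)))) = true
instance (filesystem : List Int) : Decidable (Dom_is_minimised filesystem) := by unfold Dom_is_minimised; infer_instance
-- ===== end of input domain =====

-- ===== PORT A =====
-- B differs from A by decomposition: A is one left-to-right flagged scan; B strips the
-- trailing run of -1 by a right-to-left scan, then checks the prefix for -1. Equal return values.
def pvGoA : List Int → Bool → Bool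
  | [], _ => true
  | id :: rest, found =>
    if found && id != -1 then false
    else pvGoA rest (found || id == -1)

def is_minimised (filesystem : List Int) : Bool := pvGoA filesystem false

-- ===== PORT B =====
-- length of the leading run of -1 (applied to the reversed list = B's `tail` counter)
def pvTail : List Int → Nat
  | [] => 0
  | b :: rest => if b != -1 then 0 else pvTail rest + 1

def is_minimised_alt (filesystem : List Int) : Bool :=
  !((filesystem.take (filesystem.length - pvTail filesystem.reverse)).contains (-1))

-- ===== PRECONDITION & SPEC =====
def Spec_is_minimised (filesystem : List Int) (out : Bool) : Prop := out = is_minimised_alt filesystem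
instance (filesystem : List Int) (out : Bool) : Decidable (Spec_is_minimised filesystem out) := by unfold Spec_is_minimised; infer_instance

-- ===== CLAIM =====
def Claim_equal_is_minimised : Prop := ∀ (filesystem : List Int), Dom_is_minimised filesystem → Spec_is_minimised filesystem (is_minimised filesystem)

-- ===== LEMMAS AND PROOFS =====
theorem pvTail_le (l : List Int) : pvTail l ≤ l.length := by
  induction l with
  | nil => simp [pvTail]
  | cons x r ih => simp only [pvTail, List.length_cons]; split <;> omega

-- B restated on the reversed list: true iff -1 ∉ drop (pvTail rev) rev
theorem alt_char (fs : List Int) :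
    is_minimised_alt fs = !((fs.reverse.drop (pvTail fs.reverse)).contains (-1)) := by
  unfold is_minimised_alt
  have h : fs.take (fs.length - pvTail fs.reverse)
      = (fs.reverse.drop (pvTail fs.reverse)).reverse := by
    conv_lhs => rw [← fs.reverse_reverse]
    rw [List.take_reverse]
    congr 1
    have := pvTail_le fs.reverse
    simp at this ⊢
    omega
  rw [h]
  simp

theorem goA_append (l1 l2 : List Int) (b : Bool) :
    pvGoA (l1 ++ l2) b = (pvGoA l1 b && pvGoA l2 (b || l1.contains (-1))) := by
  induction l1 generalizing b with
  | nil => simp [pvGoA]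
  | cons x r ih =>
    simp only [List.cons_append, pvGoA]
    by_cases hx : x = (-1 : Int)
    · subst hx
      simp [ih]
    · have hb : (x == (-1 : Int)) = false := by
        simp only [beq_eq_false_iff_ne, ne_eq]; exact hx
      have hd : (decide ((-1 : Int) = x)) = false := by
        simp only [decide_eq_false_iff_not]; exact fun h' => hx h'.symm
      simp [hb, hd, hx, ih, Bool.and_assoc]

theorem goA_no_neg (l : List Int) (h : (-1 : Int) ∉ l) : pvGoA l false = true := by
  induction l with
  | nil => rfl
  | cons x r ih =>
    simp at h
    have hb : (x == (-1 : Int)) = false := by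
      simp only [beq_eq_false_iff_ne, ne_eq]; exact fun h' => h.1 h'.symm
    simp [pvGoA, hb, ih h.2]

theorem main_eq (fs : List Int) : is_minimised fs = is_minimised_alt fs := by
  induction fs using List.reverseRecOn with
  | nil => decide
  | append_singleton ys x ih =>
    rw [alt_char] at ih ⊢
    unfold is_minimised at ih ⊢
    rw [goA_append]
    simp only [List.reverse_append, List.reverse_cons, List.reverse_nil, List.nil_append,
      List.cons_append]
    by_cases hx : x = (-1 : Int)
    · subst hx
      simp [pvGoA, pvTail, List.drop_succ_cons]
      simpa using ih
    · have hne : (x != (-1 : Int)) = true := by simp [hx]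
      simp [pvGoA, pvTail, hne]
      by_cases hm : (-1 : Int) ∈ ys
      · simp [hm, Ne.symm hx]
      · simp [hm, goA_no_neg ys hm, Ne.symm hx]

-- ===== VERDICT =====
theorem is_minimised_spec : Claim_equal_is_minimised := by
  intro fs _
  unfold Spec_is_minimised
  exact main_eq fs
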